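-- pv_equiv track=rewrite | github.com/nculwell/GW2 | ser/gwp.py | getMapRect
-- ===== SOURCE A (Python) =====
-- def getMapRect(m, x, y, w, h):
--     mr = []
--     for r in range(y, y+h):
--         if r < 0 or r >= len(m):
--             mr.append([ 0 for i in range(w) ])
--         else:
--             row = []
--             mr.append(row)
--             for c in range(x, x+w):
--                 if c < 0 or c >= len(m[r]):
--                     col = 0
--                 else:
--                     col = m[r][c]
--                 row.append(col)
--     return mr
-- ===== SOURCE B (Python) =====
-- def getMapRect(m, x, y, w, h):
--     # Compute the clamped overlap up front and assemble the result from
--     # zero padding + slices, instead of per-cell bounds branching.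
--     def sub_row(row):
--         c0 = max(x, 0)
--         c1 = min(x + w, len(row))
--         if c0 >= c1:
--             return [0] * w
--         return [0] * (c0 - x) + row[c0:c1] + [0] * (x + w - c1)
--     r0 = max(y, 0)
--     r1 = min(y + h, len(m))
--     if r0 >= r1:
--         return [[0] * w for _ in range(h)]
--     top = [[0] * w for _ in range(r0 - y)]
--     mid = [sub_row(m[r]) for r in range(r0, r1)]
--     bot = [[0] * w for _ in range(y + h - r1)]
--     return top + mid + bot
-- ===== Notes on version B (the rewrite author's own statement) =====
-- stated objective: alternative
-- what changed: Replaces A's per-cell bounds test inside nested loops by an up-front clamped-overlap computation: the result is assembled from zero-padding blocks plus a single slice copy per overlapping row.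
import Mathlib
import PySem

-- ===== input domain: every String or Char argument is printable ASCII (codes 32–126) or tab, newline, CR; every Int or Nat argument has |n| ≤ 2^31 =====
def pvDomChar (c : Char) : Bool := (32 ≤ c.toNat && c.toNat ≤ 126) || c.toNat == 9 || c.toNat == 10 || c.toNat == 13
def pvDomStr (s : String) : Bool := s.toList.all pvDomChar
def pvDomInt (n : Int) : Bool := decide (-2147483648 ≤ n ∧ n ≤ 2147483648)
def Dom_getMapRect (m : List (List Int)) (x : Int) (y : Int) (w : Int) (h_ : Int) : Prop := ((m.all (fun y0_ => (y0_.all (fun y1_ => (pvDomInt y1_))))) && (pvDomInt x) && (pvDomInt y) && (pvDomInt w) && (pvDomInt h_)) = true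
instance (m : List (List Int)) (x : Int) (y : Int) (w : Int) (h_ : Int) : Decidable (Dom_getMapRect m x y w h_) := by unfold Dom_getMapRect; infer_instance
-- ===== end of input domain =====

-- B replaces A's per-cell bounds branching by an up-front clamped-overlap computation
-- (zero padding + one slice per overlapping row); return value proved equal, no speed claim.

-- ===== PORT A =====
def getMapRect (m : List (List Int)) (x : Int) (y : Int) (w : Int) (h_ : Int) : List (List Int) :=
  (PySem.List.pyRange y (y + h_) 1).foldl
    (fun mr r =>
      if r < 0 ∨ (m.length : Int) ≤ r then
        mr ++ [(PySem.List.pyRange 0 w 1).map (fun _ => (0 : Int))]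
      else
        mr ++ [(PySem.List.pyRange x (x + w) 1).foldl
          (fun row c =>
            row ++ [if c < 0 ∨ ((PySem.List.pyGetD m r []).length : Int) ≤ c then (0 : Int)
                    else PySem.List.pyGetD (PySem.List.pyGetD m r []) c 0]) []]) []

-- ===== PORT B =====
-- [0] * w  (empty for w ≤ 0, as in Python)
def pvZRow (w : Int) : List Int := List.replicate w.toNat 0

-- B's sub_row helper: zero padding + slice of the clamped column overlap
def pvSubRow (x : Int) (w : Int) (row : List Int) : List Int :=
  let c0 := max x 0
  let c1 := min (x + w) (row.length : Int)
  if c0 ≥ c1 then pvZRow w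
  else List.replicate (c0 - x).toNat 0 ++ PySem.List.slice row (some c0) (some c1)
       ++ List.replicate (x + w - c1).toNat 0

def getMapRect_alt (m : List (List Int)) (x : Int) (y : Int) (w : Int) (h_ : Int) : List (List Int) :=
  let r0 := max y 0
  let r1 := min (y + h_) (m.length : Int)
  if r0 ≥ r1 then List.replicate h_.toNat (pvZRow w)
  else
    List.replicate (r0 - y).toNat (pvZRow w)
    ++ (PySem.List.pyRange r0 r1 1).map (fun r => pvSubRow x w (PySem.List.pyGetD m r []))
    ++ List.replicate (y + h_ - r1).toNat (pvZRow w)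

-- ===== PRECONDITION & SPEC =====
def Spec_getMapRect (m : List (List Int)) (x : Int) (y : Int) (w : Int) (h_ : Int) (out : List (List Int)) : Prop := out = getMapRect_alt m x y w h_
instance (m : List (List Int)) (x : Int) (y : Int) (w : Int) (h_ : Int) (out : List (List Int)) : Decidable (Spec_getMapRect m x y w h_ out) := by unfold Spec_getMapRect; infer_instance

-- ===== CLAIM (what is proved, stated in full; the proofs are below) =====
def Claim_equal_getMapRect : Prop := ∀ (m : List (List Int)) (x : Int) (y : Int) (w : Int) (h_ : Int), Dom_getMapRect m x y w h_ → Spec_getMapRect m x y w h_ (getMapRect m x y w h_)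

-- ===== LEMMAS AND PROOFS =====

-- a map that is constant over a range is a replicate
theorem pv_map_const {α : Type} (f : Int → α) (v : α) (a b : Int)
    (h : ∀ c, a ≤ c → c < b → f c = v) :
    (PySem.List.pyRange a b 1).map f = List.replicate (b - a).toNat v := by
  have hmem : ∀ u ∈ (PySem.List.pyRange a b 1).map f, u = v := by
    intro u hu
    rcases List.mem_map.1 hu with ⟨c, hc, rfl⟩
    rcases PySem.List.mem_pyRange_one.1 hc with ⟨h1, h2⟩
    exact h c h1 h2
  have := List.eq_replicate_of_mem hmem
  simpa [PySem.List.length_pyRange_one] using this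

-- an accumulator loop that conditionally appends one element is a map of the conditional
theorem pv_foldl_if_append {α β : Type} (p : α → Prop) [DecidablePred p]
    (f g : α → β) (l : List α) (acc : List β) :
    l.foldl (fun mr r => if p r then mr ++ [f r] else mr ++ [g r]) acc
      = acc ++ l.map (fun r => if p r then f r else g r) := by
  rw [show (fun (mr : List β) r => if p r then mr ++ [f r] else mr ++ [g r])
        = fun mr r => mr ++ [if p r then f r else g r] from by
    funext mr r; split_ifs <;> rfl]
  exact PySem.List.foldl_append_singleton_eq_map _ l acc

-- the slice of the clamped overlap is the map of in-range lookups
theorem pv_slice_eq_map (row : List Int) (c0 c1 : Int) (h0 : 0 ≤ c0) (h01 : c0 ≤ c1)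
    (h1 : c1 ≤ (row.length : Int)) :
    (PySem.List.pyRange c0 c1 1).map (fun c => PySem.List.pyGetD row c 0)
      = PySem.List.slice row (some c0) (some c1) := by
  have hfull := PySem.List.map_pyGetD_pyRange row 0 h0
  rw [show PySem.List.len row = (row.length : Int) from by simp [PySem.List.len],
      PySem.List.pyRange_one_append c0 c1 (row.length : Int) h01 h1,
      List.map_append] at hfull
  have hA : (PySem.List.pyRange c0 c1 1).map (fun c => PySem.List.pyGetD row c 0)
      = (row.drop c0.toNat).take (c1 - c0).toNat := by
    have htake := List.take_left
      (l₁ := (PySem.List.pyRange c0 c1 1).map (fun c => PySem.List.pyGetD row c 0))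
      (l₂ := (PySem.List.pyRange c1 (row.length : Int) 1).map (fun c => PySem.List.pyGetD row c 0))
    rw [hfull] at htake
    rw [← htake]
    congr 1
    simp [PySem.List.length_pyRange_one]
  rw [hA, PySem.List.slice_of_nonneg row h0 (le_trans h0 h01) (le_trans h01 h1) h1]
  congr 1
  omega

-- A's per-cell row (as a map) equals B's sub_row
theorem pv_row_eq (mrow : List Int) (x w : Int) :
    (PySem.List.pyRange x (x + w) 1).map
        (fun c => if c < 0 ∨ (mrow.length : Int) ≤ c then (0 : Int)
                  else PySem.List.pyGetD mrow c 0)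
    = pvSubRow x w mrow := by
  simp only [pvSubRow, pvZRow]
  by_cases hcc : max x 0 ≥ min (x + w) (mrow.length : Int)
  · rw [if_pos hcc,
      pv_map_const _ 0 x (x + w) (by
        intro c h1 h2
        have : c < 0 ∨ (mrow.length : Int) ≤ c := by omega
        simp [this])]
    congr 1
    omega
  · rw [if_neg hcc]
    push Not at hcc
    have hx0 : x ≤ max x 0 := le_max_left _ _
    rw [PySem.List.pyRange_one_append x (max x 0) (x + w) hx0 (by omega),
        PySem.List.pyRange_one_append (max x 0) (min (x + w) (mrow.length : Int)) (x + w)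
          (by omega) (by omega),
        List.map_append, List.map_append]
    rw [pv_map_const _ 0 x (max x 0) (by
        intro c h1 h2
        have : c < 0 := by omega
        simp [this]),
      pv_map_const _ 0 (min (x + w) (mrow.length : Int)) (x + w) (by
        intro c h1 h2
        have : (mrow.length : Int) ≤ c := by omega
        simp [this]),
      List.map_congr_left (l := PySem.List.pyRange (max x 0) (min (x + w) (mrow.length : Int)) 1)
        (h := by
          intro c hc
          rcases PySem.List.mem_pyRange_one.1 hc with ⟨h1, h2⟩
          have hno : ¬ (c < 0 ∨ (mrow.length : Int) ≤ c) := by omega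
          rw [if_neg hno]),
      pv_slice_eq_map mrow (max x 0) (min (x + w) (mrow.length : Int)) (by omega) (by omega) (by omega),
      List.append_assoc]

-- ===== VERDICT (by name: the statement is the Claim_ definition above) =====
theorem getMapRect_spec : Claim_equal_getMapRect := by
  intro m x y w h_ _
  unfold Spec_getMapRect getMapRect
  rw [pv_foldl_if_append (fun r => r < 0 ∨ (m.length : Int) ≤ r)
        (fun _ => (PySem.List.pyRange 0 w 1).map (fun _ => (0 : Int)))
        (fun r => (PySem.List.pyRange x (x + w) 1).foldl
          (fun row c =>
            row ++ [if c < 0 ∨ ((PySem.List.pyGetD m r []).length : Int) ≤ c then (0 : Int)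
                    else PySem.List.pyGetD (PySem.List.pyGetD m r []) c 0]) []),
      List.nil_append]
  have hz : (PySem.List.pyRange 0 w 1).map (fun _ => (0 : Int)) = pvZRow w := by
    rw [pv_map_const _ 0 0 w (fun _ _ _ => rfl)]
    unfold pvZRow
    congr 1
    omega
  have hG : (PySem.List.pyRange y (y + h_) 1).map
        (fun r => if r < 0 ∨ (m.length : Int) ≤ r then
            (PySem.List.pyRange 0 w 1).map (fun _ => (0 : Int))
          else (PySem.List.pyRange x (x + w) 1).foldl
            (fun row c =>
              row ++ [if c < 0 ∨ ((PySem.List.pyGetD m r []).length : Int) ≤ c then (0 : Int)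
                      else PySem.List.pyGetD (PySem.List.pyGetD m r []) c 0]) [])
      = (PySem.List.pyRange y (y + h_) 1).map
        (fun r => if r < 0 ∨ (m.length : Int) ≤ r then pvZRow w
          else pvSubRow x w (PySem.List.pyGetD m r [])) := by
    apply List.map_congr_left
    intro r _
    split_ifs with h
    · exact hz
    · rw [PySem.List.foldl_append_singleton_eq_map
            (fun c => if c < 0 ∨ ((PySem.List.pyGetD m r []).length : Int) ≤ c then (0 : Int)
                      else PySem.List.pyGetD (PySem.List.pyGetD m r []) c 0),
          List.nil_append]
      exact pv_row_eq (PySem.List.pyGetD m r []) x w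
  rw [hG]
  simp only [getMapRect_alt]
  by_cases hrr : max y 0 ≥ min (y + h_) (m.length : Int)
  · rw [if_pos hrr,
      pv_map_const _ (pvZRow w) y (y + h_) (by
        intro r h1 h2
        have : r < 0 ∨ (m.length : Int) ≤ r := by omega
        simp [this])]
    congr 1
    omega
  · rw [if_neg hrr]
    push Not at hrr
    rw [PySem.List.pyRange_one_append y (max y 0) (y + h_) (le_max_left _ _) (by omega),
        PySem.List.pyRange_one_append (max y 0) (min (y + h_) (m.length : Int)) (y + h_)
          (by omega) (by omega),
        List.map_append, List.map_append]
    rw [pv_map_const _ (pvZRow w) y (max y 0) (by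
        intro r h1 h2
        have : r < 0 := by omega
        simp [this]),
      pv_map_const _ (pvZRow w) (min (y + h_) (m.length : Int)) (y + h_) (by
        intro r h1 h2
        have : (m.length : Int) ≤ r := by omega
        simp [this]),
      List.map_congr_left (l := PySem.List.pyRange (max y 0) (min (y + h_) (m.length : Int)) 1)
        (h := by
          intro r hr
          rcases PySem.List.mem_pyRange_one.1 hr with ⟨h1, h2⟩
          have hno : ¬ (r < 0 ∨ (m.length : Int) ≤ r) := by omega
          rw [if_neg hno]),
      List.append_assoc]
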